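-- pv_equiv track=rewrite | github.com/DoItBetter-Studio/Glyphborn | Mapper/tools/convert_image.py | pack_pixels
-- ===== SOURCE A (Python) =====
-- def pack_pixels(pixels, bitdepth):
--     """Pack pixel indices into bytes according to bitdepth."""
--     packed = []
--     pixels_per_byte = 8 // bitdepth
--     mask = (1 << bitdepth) - 1
--
--     for i in range(0, len(pixels), pixels_per_byte):
--         byte = 0
--         for j in range(pixels_per_byte):
--             if i + j < len(pixels):
--                 pix = pixels[i + j] & mask
--                 shift = (pixels_per_byte - 1 - j) * bitdepth
--                 byte |= pix << shift
--         packed.append(byte)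
--     return packed
-- ===== SOURCE B (Python) =====
-- def pack_pixels(pixels, bitdepth):
--     """Pack pixel indices into bytes according to bitdepth (single flat pass)."""
--     packed = []
--     pixels_per_byte = 8 // bitdepth
--     mask = (1 << bitdepth) - 1
--     byte = 0
--     count = 0
--     for pix in pixels:
--         byte = (byte << bitdepth) | (pix & mask)
--         count += 1
--         if count == pixels_per_byte:
--             packed.append(byte)
--             byte = 0
--             count = 0
--     if count:
--         packed.append(byte << (pixels_per_byte - count) * bitdepth)
--     return packed
-- ===== Notes on version B (the rewrite author's own statement) =====
-- stated objective: simpler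
-- what changed: Replaced the nested per-chunk loop with its explicit index/shift arithmetic by one flat pass over the pixels that Horner-accumulates a running byte with a counter, flushing it every pixels_per_byte pixels and left-aligning a trailing partial byte.
import Mathlib
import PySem

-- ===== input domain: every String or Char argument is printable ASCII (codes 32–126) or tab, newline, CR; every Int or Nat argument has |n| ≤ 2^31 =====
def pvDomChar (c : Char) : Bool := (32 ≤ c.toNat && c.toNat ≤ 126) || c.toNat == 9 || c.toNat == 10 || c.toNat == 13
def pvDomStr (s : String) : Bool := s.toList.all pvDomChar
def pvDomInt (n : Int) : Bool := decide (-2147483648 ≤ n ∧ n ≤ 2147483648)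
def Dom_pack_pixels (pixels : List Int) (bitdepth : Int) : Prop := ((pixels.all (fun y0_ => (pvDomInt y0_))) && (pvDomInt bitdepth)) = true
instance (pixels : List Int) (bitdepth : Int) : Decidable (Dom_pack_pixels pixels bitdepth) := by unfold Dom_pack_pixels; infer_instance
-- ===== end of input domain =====

-- B replaces A's nested per-chunk loop (explicit index/shift arithmetic) by one flat
-- Horner-accumulating pass with a counter; objective: simpler, same cost.


-- ===== PORT A =====
-- '1 << bitdepth' is ported with a Nat shift of bitdepth.toNat and the shift amounts with
-- '.toNat': exact for the Pre_ range 1..8 (Python raises outside it, see Pre_ below).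
-- 'pixels[i + j]' is guarded by 'i + j < len(pixels)' in A, so pyGetD's default is never used.
def pack_pixels (pixels : List Int) (bitdepth : Int) : List Int :=
  let pixels_per_byte := PySem.Int.floordiv 8 bitdepth
  let mask : Int := (1 <<< bitdepth.toNat) - 1
  (PySem.List.pyRange 0 (pixels.length : Int) pixels_per_byte).foldl
    (fun packed i =>
      let byte :=
        (PySem.List.pyRange 0 pixels_per_byte 1).foldl
          (fun byte j =>
            if i + j < (pixels.length : Int) then
              let pix := PySem.Int.band (PySem.List.pyGetD pixels (i + j) 0) mask
              let shift := ((pixels_per_byte - 1 - j) * bitdepth).toNat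
              PySem.Int.bor byte (pix <<< shift)
            else byte)
          0
      packed ++ [byte])
    []

-- ===== PORT B =====
def pack_pixels_alt (pixels : List Int) (bitdepth : Int) : List Int :=
  let pixels_per_byte := PySem.Int.floordiv 8 bitdepth
  let mask : Int := (1 <<< bitdepth.toNat) - 1
  let st :=
    pixels.foldl
      (fun (st : List Int × Int × Int) pix =>
        let byte := PySem.Int.bor (st.2.1 <<< bitdepth.toNat) (PySem.Int.band pix mask)
        let count := st.2.2 + 1
        if count = pixels_per_byte then (st.1 ++ [byte], 0, 0) else (st.1, byte, count))
      ([], 0, 0)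
  if st.2.2 ≠ 0 then st.1 ++ [st.2.1 <<< ((pixels_per_byte - st.2.2) * bitdepth).toNat]
  else st.1

-- ===== PRECONDITION & SPEC =====
-- Pre_ is exactly where Python A returns normally: bitdepth = 0 raises ZeroDivisionError,
-- bitdepth < 0 raises ValueError (negative shift count in the mask), and bitdepth > 8 raises
-- ValueError (range() step 0, since 8 // bitdepth = 0).
def Pre_pack_pixels (pixels : List Int) (bitdepth : Int) : Prop := 1 ≤ bitdepth ∧ bitdepth ≤ 8
instance (pixels : List Int) (bitdepth : Int) : Decidable (Pre_pack_pixels pixels bitdepth) := by unfold Pre_pack_pixels; infer_instance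
def pvWitness_pack_pixels : List Int × Int := ([0, 1, 2, 3, 5], 2)

def Spec_pack_pixels (pixels : List Int) (bitdepth : Int) (out : List Int) : Prop := out = pack_pixels_alt pixels bitdepth
instance (pixels : List Int) (bitdepth : Int) (out : List Int) : Decidable (Spec_pack_pixels pixels bitdepth out) := by unfold Spec_pack_pixels; infer_instance

-- ===== CLAIM (what is proved, stated in full; the proofs are below) =====
def Claim_equal_pack_pixels : Prop := ∀ (pixels : List Int) (bitdepth : Int), Dom_pack_pixels pixels bitdepth → Pre_pack_pixels pixels bitdepth → Spec_pack_pixels pixels bitdepth (pack_pixels pixels bitdepth)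

-- ===== LEMMAS AND PROOFS =====

def hornerMask (k : Nat) (mask : Int) (acc : Int) (c : List Int) : Int :=
  c.foldl (fun b pix => b * 2 ^ k + PySem.Int.band pix mask) acc

def specPack (k pm : Nat) (mask : Int) : List Int → List Int
  | [] => []
  | x :: xs =>
    hornerMask k mask 0 (x :: xs.take pm) * 2 ^ (k * ((pm + 1) - (x :: xs.take pm).length))
      :: specPack k pm mask (xs.drop pm)
termination_by xs => xs.length
decreasing_by simp

lemma band_mask_bounds (x mask : Int) (hm : 0 ≤ mask) :
    0 ≤ PySem.Int.band x mask ∧ PySem.Int.band x mask ≤ mask := by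
  simp only [PySem.Int.band]
  split_ifs with h1
  · have h := Nat.and_le_right (n := x.toNat) (m := mask.toNat)
    omega
  · have h := Nat.and_le_left (n := mask.toNat) (m := (-x - 1).toNat)
    omega

lemma band_mask_nonneg (x : Int) (k : Nat) (mask : Int) (hm : mask = 2 ^ k - 1) :
    0 ≤ PySem.Int.band x mask ∧ PySem.Int.band x mask < 2 ^ k := by
  have h1 : (1:Int) ≤ 2 ^ k := one_le_pow₀ (by norm_num)
  have h := band_mask_bounds x mask (by omega)
  omega

lemma horner_nonneg (k : Nat) (mask : Int) (hm : mask = 2 ^ k - 1) (c : List Int) :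
    ∀ acc : Int, 0 ≤ acc → 0 ≤ hornerMask k mask acc c := by
  induction c with
  | nil => intro acc h; simpa [hornerMask] using h
  | cons x t ih =>
    intro acc h
    have hb := (band_mask_nonneg x k mask hm).1
    have h2 : (0:Int) ≤ acc * 2 ^ k + PySem.Int.band x mask := by positivity
    simpa [hornerMask, List.foldl_cons] using ih _ h2

lemma bor_lowbits (X b : Int) (c : Nat) (hX : 0 ≤ X) (hb0 : 0 ≤ b) (hb : b < 2 ^ c) :
    PySem.Int.bor (X * 2 ^ c) b = X * 2 ^ c + b := by
  rcases Int.eq_ofNat_of_zero_le hX with ⟨m, rfl⟩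
  rcases Int.eq_ofNat_of_zero_le hb0 with ⟨n, rfl⟩
  have hn : n < 2 ^ c := by exact_mod_cast hb
  rw [show ((m:Int)) * 2 ^ c = ((2 ^ c * m : Nat) : Int) by push_cast; ring,
      PySem.Int.bor_natCast, ← Nat.two_pow_add_eq_or_of_lt hn]
  push_cast; ring

lemma pyRange_pos_cons (a b s : Int) (hs : 0 < s) (hab : a < b) :
    PySem.List.pyRange a b s = a :: PySem.List.pyRange (a + s) b s := by
  rw [PySem.List.pyRange_of_pos _ _ hs, PySem.List.pyRange_of_pos _ _ hs, if_pos hab]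
  by_cases h2 : a + s < b
  · rw [if_pos h2]
    have key : ((b - a + s - 1) / s).toNat = ((b - (a + s) + s - 1) / s).toNat + 1 := by
      have he : b - a + s - 1 = (b - (a + s) + s - 1) + 1 * s := by ring
      rw [he, Int.add_mul_ediv_right _ _ (by omega : s ≠ 0)]
      have hnn : 0 ≤ (b - (a + s) + s - 1) / s := Int.ediv_nonneg (by omega) (by omega)
      omega
    rw [key, List.range_succ_eq_map]
    simp [List.map_map, Function.comp_def]
    intro k _
    ring
  · rw [if_neg h2]
    have h1 : (b - a + s - 1) / s = 1 := by
      rw [← PySem.Int.floordiv_eq_ediv_of_pos hs, PySem.Int.floordiv_eq_iff_of_pos hs]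
      omega
    simp [h1]

lemma A_inner (pixels : List Int) (k p : Nat) (mask : Int) (hm : mask = 2 ^ k - 1)
    (i : Nat) (m : Nat) (hmp : m ≤ p) :
    (List.range m).foldl
        (fun byte j =>
          if i + j < pixels.length then
            PySem.Int.bor byte (PySem.Int.band (pixels.getD (i + j) 0) mask <<< (k * (p - 1 - j)))
          else byte) 0
      = hornerMask k mask 0 ((pixels.drop i).take m)
          * 2 ^ (k * (p - ((pixels.drop i).take m).length)) := by
  induction m with
  | zero => simp [hornerMask]
  | succ m ih =>
    rw [List.range_succ, List.foldl_append, ih (by omega)]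
    simp only [List.foldl_cons, List.foldl_nil]
    by_cases h : i + m < pixels.length
    · rw [if_pos h]
      have hmlt : m < (pixels.drop i).length := by simp [List.length_drop]; omega
      have hget : (List.drop i pixels)[m] = pixels.getD (i + m) 0 := by
        rw [List.getElem_drop]
        exact (List.getD_eq_getElem pixels 0 (by omega)).symm
      have hlen0 : ((pixels.drop i).take m).length = m := by
        simp [List.length_take]; omega
      have htake : (pixels.drop i).take (m + 1) = (pixels.drop i).take m ++ [pixels.getD (i + m) 0] := by
        rw [List.take_add_one, List.getElem?_eq_getElem hmlt]
        simp [hget]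
      rw [htake]
      simp only [List.length_append, List.length_cons, List.length_nil, hlen0]
      have hH : 0 ≤ hornerMask k mask 0 ((pixels.drop i).take m) :=
        horner_nonneg k mask hm _ 0 le_rfl
      have hb := band_mask_nonneg (pixels.getD (i + m) 0) k mask hm
      have hsplit : k * (p - m) = k * (p - 1 - m) + k := by
        have h1 : p - m = (p - 1 - m) + 1 := by omega
        rw [h1, Nat.mul_add, Nat.mul_one]
      have hBlt : PySem.Int.band (pixels.getD (i + m) 0) mask * 2 ^ (k * (p - 1 - m))
          < 2 ^ (k * (p - m)) := by
        rw [hsplit, pow_add]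
        have hpos : (0:Int) < 2 ^ (k * (p - 1 - m)) := by positivity
        nlinarith [hb.1, hb.2]
      rw [Int.shiftLeft_eq, bor_lowbits _ _ _ hH (mul_nonneg hb.1 (by positivity)) hBlt]
      have he : p - (m + 0 + 1) = p - 1 - m := by omega
      simp only [he]
      simp only [hornerMask, List.foldl_append, List.foldl_cons, List.foldl_nil]
      rw [hsplit, pow_add]
      ring
    · rw [if_neg h]
      have hlen2 : (pixels.drop i).length ≤ m := by simp [List.length_drop]; omega
      rw [List.take_of_length_le hlen2, List.take_of_length_le (le_trans hlen2 (Nat.le_succ m))]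

lemma specPack_eq (k p : Nat) (mask : Int) (hp : 1 ≤ p) (x : Int) (xs : List Int) :
    specPack k (p - 1) mask (x :: xs)
      = hornerMask k mask 0 ((x :: xs).take p) * 2 ^ (k * (p - ((x :: xs).take p).length))
        :: specPack k (p - 1) mask ((x :: xs).drop p) := by
  conv_lhs => rw [specPack]
  have hp' : p = (p - 1) + 1 := by omega
  rw [show (x :: xs).take p = x :: xs.take (p - 1) by rw [hp']; rfl,
      show (x :: xs).drop p = xs.drop (p - 1) by rw [hp']; rfl, ← hp']

lemma B_chunk (k p : Nat) (mask : Int) (hm : mask = 2 ^ k - 1) (c : List Int) :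
    ∀ (packed : List Int) (byte : Int) (cnt : Nat), 0 ≤ byte → cnt + c.length ≤ p → cnt < p →
      c.foldl
          (fun (st : List Int × Int × Int) pix =>
            let byte := PySem.Int.bor (st.2.1 <<< k) (PySem.Int.band pix mask)
            let count := st.2.2 + 1
            if count = (p : Int) then (st.1 ++ [byte], 0, 0) else (st.1, byte, count))
          (packed, byte, (cnt : Int))
        = if cnt + c.length = p then (packed ++ [hornerMask k mask byte c], 0, 0)
          else (packed, hornerMask k mask byte c, ((cnt + c.length : Nat) : Int)) := by
  induction c with
  | nil =>
    intro packed byte cnt hb hle hlt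
    simp only [List.foldl_nil, List.length_nil, Nat.add_zero]
    rw [if_neg (by omega)]
    simp [hornerMask]
  | cons x t ih =>
    intro packed byte cnt hb hle hlt
    simp only [List.length_cons] at hle
    simp only [List.foldl_cons, List.length_cons]
    have hband := band_mask_nonneg x k mask hm
    have hbor : PySem.Int.bor (byte <<< k) (PySem.Int.band x mask)
        = byte * 2 ^ k + PySem.Int.band x mask := by
      rw [Int.shiftLeft_eq]
      exact bor_lowbits byte _ k hb hband.1 hband.2
    by_cases hc : cnt + 1 = p
    · have ht : t = [] := List.eq_nil_of_length_eq_zero (by omega)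
      subst ht
      simp only [List.foldl_nil, List.length_nil]
      rw [if_pos (by exact_mod_cast congrArg (Nat.cast : Nat → Int) hc)]
      rw [if_pos (by omega)]
      simp [hornerMask, hbor]
    · rw [if_neg (by intro hcon; exact hc (by exact_mod_cast hcon))]
      rw [show (cnt : Int) + 1 = ((cnt + 1 : Nat) : Int) by push_cast; ring]
      rw [ih packed _ (cnt + 1) (by rw [hbor]; have h9 := hband.1; positivity) (by omega) (by omega)]
      have harr : cnt + 1 + t.length = cnt + (t.length + 1) := by omega
      rw [harr]
      have hh : hornerMask k mask (PySem.Int.bor (byte <<< k) (PySem.Int.band x mask)) t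
          = hornerMask k mask byte (x :: t) := by
        simp [hornerMask, hbor]
      rw [hh]

lemma B_main (k p : Nat) (mask : Int) (hm : mask = 2 ^ k - 1) (hp : 1 ≤ p) :
    ∀ (N : Nat) (xs : List Int), xs.length ≤ N → ∀ packed : List Int,
      (let st := xs.foldl
          (fun (st : List Int × Int × Int) pix =>
            let byte := PySem.Int.bor (st.2.1 <<< k) (PySem.Int.band pix mask)
            let count := st.2.2 + 1
            if count = (p : Int) then (st.1 ++ [byte], 0, 0) else (st.1, byte, count))
          (packed, 0, 0)
       if st.2.2 ≠ 0 then st.1 ++ [st.2.1 <<< (((p : Int) - st.2.2) * (k : Int)).toNat] else st.1)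
      = packed ++ specPack k (p - 1) mask xs := by
  intro N
  induction N with
  | zero =>
    intro xs hlen packed
    have : xs = [] := List.eq_nil_of_length_eq_zero (by omega)
    subst this
    simp [specPack]
  | succ N ihN =>
    intro xs hlen packed
    cases xs with
    | nil => simp [specPack]
    | cons x t =>
      have hlen' : t.length + 1 ≤ N + 1 := by simpa using hlen
      by_cases hL : (x :: t).length < p
      · have hch := B_chunk k p mask hm (x :: t) packed 0 0 le_rfl (by omega) (by omega)
        simp only [Nat.cast_zero, Nat.zero_add] at hch
        rw [if_neg (by omega : ¬ (x :: t).length = p)] at hch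
        simp only [hch]
        rw [if_pos (by simp; omega)]
        have hsh : ((p : Int) - ((x :: t).length : Int)) * (k : Int)
            = (((p - (x :: t).length) * k : Nat) : Int) := by
          push_cast [Nat.cast_sub (le_of_lt hL)]
          ring
        rw [hsh, Int.toNat_natCast, Int.shiftLeft_eq]
        have hL' : t.length + 1 < p := by simpa using hL
        rw [specPack_eq k p mask hp, List.take_of_length_le (le_of_lt hL),
            List.drop_eq_nil_of_le (by simp; omega)]
        simp only [specPack]
        rw [Nat.mul_comm]
      · have hL2 : ¬ t.length + 1 < p := by simpa using hL
        have hc1 : ((x :: t).take p).length = p := by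
          simp only [List.length_take, List.length_cons]; omega
        conv_lhs => rw [show x :: t = (x :: t).take p ++ (x :: t).drop p from (List.take_append_drop p (x :: t)).symm]
        rw [List.foldl_append]
        have hch := B_chunk k p mask hm ((x :: t).take p) packed 0 0 le_rfl (by simp [hc1]) (by omega)
        simp only [Nat.cast_zero, Nat.zero_add] at hch
        rw [if_pos hc1] at hch
        rw [hch]
        have hrest := ihN ((x :: t).drop p) (by simp [List.length_drop, List.length_cons]; omega) (packed ++ [hornerMask k mask 0 ((x :: t).take p)])
        simp only at hrest
        rw [hrest]
        rw [specPack_eq k p mask hp, hc1]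
        simp

lemma A_inner_port (pixels : List Int) (k p : Nat) (mask : Int) (hm : mask = 2 ^ k - 1)
    (i : Nat) :
    (PySem.List.pyRange 0 (p : Int) 1).foldl
        (fun byte j =>
          if (i : Int) + j < (pixels.length : Int) then
            PySem.Int.bor byte
              (PySem.Int.band (PySem.List.pyGetD pixels ((i : Int) + j) 0) mask <<<
                (((p : Int) - 1 - j) * (k : Int)).toNat)
          else byte) 0
      = hornerMask k mask 0 ((pixels.drop i).take p)
          * 2 ^ (k * (p - ((pixels.drop i).take p).length)) := by
  rw [PySem.List.pyRange_zero_natCast, List.foldl_map]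
  refine Eq.trans (PySem.List.foldl_congr_mem _ _ _ _ ?_) (A_inner pixels k p mask hm i p le_rfl)
  intro acc j hj
  have hjp : j < p := List.mem_range.mp hj
  have hcast : ((i : Int) + (j : Int)) = ((i + j : Nat) : Int) := by push_cast; ring
  rw [hcast, PySem.List.pyGetD_natCast]
  have hc1 : ((p : Int) - 1 - (j : Int)) = ((p - 1 - j : Nat) : Int) := by omega
  rw [hc1, ← Nat.cast_mul, Int.toNat_natCast, Nat.mul_comm]
  refine if_congr ?_ rfl rfl
  exact_mod_cast Iff.rfl

lemma A_outer (pixels : List Int) (k p : Nat) (mask : Int) (hm : mask = 2 ^ k - 1) (hp : 1 ≤ p) :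
    ∀ (N i : Nat), pixels.length - i ≤ N → ∀ acc : List Int,
      (PySem.List.pyRange (i : Int) (pixels.length : Int) (p : Int)).foldl
          (fun packed ii =>
            packed ++
              [(PySem.List.pyRange 0 (p : Int) 1).foldl
                  (fun byte j =>
                    if ii + j < (pixels.length : Int) then
                      PySem.Int.bor byte
                        (PySem.Int.band (PySem.List.pyGetD pixels (ii + j) 0) mask <<<
                          (((p : Int) - 1 - j) * (k : Int)).toNat)
                    else byte) 0]) acc
        = acc ++ specPack k (p - 1) mask (pixels.drop i) := by
  intro N
  induction N with
  | zero =>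
    intro i hi acc
    have hge : pixels.length ≤ i := by omega
    rw [PySem.List.pyRange_of_pos _ _ (by exact_mod_cast hp : (0:Int) < (p : Int)),
        if_neg (by exact_mod_cast Nat.not_lt.mpr hge)]
    simp [List.drop_eq_nil_of_le hge, specPack]
  | succ N ihN =>
    intro i hi acc
    by_cases hlt : i < pixels.length
    · rw [pyRange_pos_cons (i : Int) (pixels.length : Int) (p : Int)
            (by exact_mod_cast hp) (by exact_mod_cast hlt),
          List.foldl_cons]
      rw [show ((i : Int) + (p : Int)) = ((i + p : Nat) : Int) by push_cast; ring]
      rw [ihN (i + p) (by omega) _]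
      obtain ⟨y, ys, hys⟩ : ∃ y ys, pixels.drop i = y :: ys := by
        cases h : pixels.drop i with
        | nil => exfalso; have := congrArg List.length h; simp [List.length_drop] at this; omega
        | cons a b => exact ⟨a, b, rfl⟩
      rw [A_inner_port pixels k p mask hm i]
      rw [hys, specPack_eq k p mask hp]
      rw [show List.drop p (y :: ys) = List.drop (i + p) pixels by rw [← hys, List.drop_drop]]
      simp [List.append_assoc]
    · have hge : pixels.length ≤ i := by omega
      rw [PySem.List.pyRange_of_pos _ _ (by exact_mod_cast hp : (0:Int) < (p : Int)),
          if_neg (by exact_mod_cast Nat.not_lt.mpr hge)]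
      simp [List.drop_eq_nil_of_le hge, specPack]

theorem pack_pixels_eq (pixels : List Int) (bitdepth : Int)
    (h1 : 1 ≤ bitdepth) (h2 : bitdepth ≤ 8) :
    pack_pixels pixels bitdepth = pack_pixels_alt pixels bitdepth := by
  obtain ⟨k, hbd⟩ : ∃ k : Nat, bitdepth = (k : Int) := ⟨bitdepth.toNat, by omega⟩
  subst hbd
  have hk1 : 1 ≤ k := by omega
  have hk8 : k ≤ 8 := by omega
  have hp : 1 ≤ 8 / k := (Nat.one_le_div_iff (by omega)).mpr hk8
  have hP : PySem.Int.floordiv 8 (k : Int) = ((8 / k : Nat) : Int) := by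
    rw [show (8:Int) = ((8:Nat):Int) by norm_num]
    exact PySem.Int.floordiv_natCast 8 k
  have hmask : (((1 <<< k : Nat) : Int)) - 1 = 2 ^ k - 1 := by
    rw [Nat.shiftLeft_eq]; push_cast; ring
  simp only [pack_pixels, pack_pixels_alt, Int.toNat_natCast, hP, hmask]
  have hA := A_outer pixels k (8 / k) _ rfl hp pixels.length 0 (by omega) []
  simp only [Nat.cast_zero] at hA
  have hB := B_main k (8 / k) _ rfl hp pixels.length pixels le_rfl []
  rw [hA, hB]
  simp

-- ===== VERDICT (by name: the statement is the Claim_ definition above) =====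
theorem pack_pixels_spec : Claim_equal_pack_pixels := by
  intro pixels bitdepth _ hpre
  unfold Spec_pack_pixels
  exact pack_pixels_eq pixels bitdepth hpre.1 hpre.2
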